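-- pv_equiv track=rewrite | github.com/evgenyshiryaev/algo | python/ds/array.py | prefix_sum_2d_diag_up_1
-- ===== SOURCE A (Python) =====
-- def prefix_sum_2d_diag_up_1(a):
--     Y, X = len(a), len(a[0])
--     ps = [[0] * (Y + 1) for _ in range(Y + X - 1)]
--     for y in range(Y):
--         for x in range(X):
--             i = y + x
--             ps[i][y + 1] = ps[i][y] + a[y][x]
--     return ps
-- ===== SOURCE B (Python) =====
-- def prefix_sum_2d_diag_up_1(a):
--     Y, X = len(a), len(a[0])
--     ps = [[0] * (Y + 1) for _ in range(Y + X - 1)]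
--     for i in range(Y + X - 1):
--         s = 0
--         for y in range(max(0, i - X + 1), min(Y - 1, i) + 1):
--             s += a[y][i - y]
--             ps[i][y + 1] = s
--     return ps
-- ===== Notes on version B (the rewrite author's own statement) =====
-- stated objective: alternative
-- what changed: Replaces the row-major double loop that uses the ps array itself as the accumulator (ps[i][y+1] = ps[i][y] + a[y][x]) by an anti-diagonal-grouped traversal: for each diagonal i, walk only its valid rows with a scalar running sum and write it into ps[i][y+1].
import Mathlib
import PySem

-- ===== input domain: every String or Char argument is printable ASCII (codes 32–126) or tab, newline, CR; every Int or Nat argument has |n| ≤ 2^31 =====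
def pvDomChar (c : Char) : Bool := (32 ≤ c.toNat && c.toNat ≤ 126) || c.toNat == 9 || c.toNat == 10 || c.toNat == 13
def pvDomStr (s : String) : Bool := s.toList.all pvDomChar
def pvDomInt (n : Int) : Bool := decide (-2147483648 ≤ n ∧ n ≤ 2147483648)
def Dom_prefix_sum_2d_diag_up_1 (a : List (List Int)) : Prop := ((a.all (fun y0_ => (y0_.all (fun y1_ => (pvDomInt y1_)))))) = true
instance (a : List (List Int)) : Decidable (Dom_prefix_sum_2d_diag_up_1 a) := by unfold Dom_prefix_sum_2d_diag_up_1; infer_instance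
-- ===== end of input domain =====

-- B replaces A's row-major double loop (which uses the ps array itself as accumulator)
-- by an anti-diagonal traversal with a scalar running sum per diagonal: same values, alternative decomposition.


-- ===== PORT A =====
def prefix_sum_2d_diag_up_1 (a : List (List Int)) : List (List Int) :=
  let Y := a.length
  let X := (a.headD []).length
  let ps := (List.range (Y + X - 1)).map (fun _ => List.replicate (Y + 1) (0 : Int))
  (List.range Y).foldl (fun ps y =>
    (List.range X).foldl (fun ps x =>
      ps.set (y + x) ((ps.getD (y + x) []).set (y + 1)
        ((ps.getD (y + x) []).getD y 0 + (a.getD y []).getD x 0))) ps) ps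

-- ===== PORT B =====
def prefix_sum_2d_diag_up_1_alt (a : List (List Int)) : List (List Int) :=
  let Y := a.length
  let X := (a.headD []).length
  let ps0 := (List.range (Y + X - 1)).map (fun _ => List.replicate (Y + 1) (0 : Int))
  (List.range (Y + X - 1)).foldl (fun ps i =>
    ((List.range' (i + 1 - X) (min (Y - 1) i + 1 - (i + 1 - X))).foldl
      (fun (st : List (List Int) × Int) y =>
        ((st.1).set i (((st.1).getD i []).set (y + 1) (st.2 + (a.getD y []).getD (i - y) 0)),
         st.2 + (a.getD y []).getD (i - y) 0))
      (ps, 0)).1) ps0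

-- ===== PRECONDITION & SPEC =====
-- Pre_ excludes exactly the inputs on which the Python A raises IndexError:
-- an empty outer list (a[0] fails) and ragged inputs with a row shorter than a[0] (a[y][x] fails).
def Pre_prefix_sum_2d_diag_up_1 (a : List (List Int)) : Prop :=
  a ≠ [] ∧ ∀ r ∈ a, (a.headD []).length ≤ r.length
instance (a : List (List Int)) : Decidable (Pre_prefix_sum_2d_diag_up_1 a) := by
  unfold Pre_prefix_sum_2d_diag_up_1; infer_instance
def pvWitness_prefix_sum_2d_diag_up_1 : List (List Int) := [[1, 2], [3, 4]]
def Spec_prefix_sum_2d_diag_up_1 (a : List (List Int)) (out : List (List Int)) : Prop := out = prefix_sum_2d_diag_up_1_alt a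
instance (a : List (List Int)) (out : List (List Int)) : Decidable (Spec_prefix_sum_2d_diag_up_1 a out) := by unfold Spec_prefix_sum_2d_diag_up_1; infer_instance

-- ===== CLAIM (what is proved, stated in full; the proofs are below) =====
def Claim_equal_prefix_sum_2d_diag_up_1 : Prop := ∀ (a : List (List Int)), Dom_prefix_sum_2d_diag_up_1 a → Pre_prefix_sum_2d_diag_up_1 a → Spec_prefix_sum_2d_diag_up_1 a (prefix_sum_2d_diag_up_1 a)

-- ===== LEMMAS AND PROOFS =====

theorem pvSet_map_range {α : Type} (n : Nat) (f : Nat → α) (i0 : Nat) (v : α) :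
    ((List.range n).map f).set i0 v
      = (List.range n).map (fun i => if i = i0 then v else f i) := by
  apply List.ext_getElem?
  intro i
  by_cases hi : i < n
  · rw [List.getElem?_set]
    by_cases hii : i0 = i
    · simp [hii, hi]
    · have : ¬ i = i0 := fun h => hii h.symm
      simp [hii, hi, this]
  · rw [List.getElem?_eq_none (by simpa using Nat.le_of_not_lt hi)]
    rw [List.getElem?_eq_none (by simpa using Nat.le_of_not_lt hi)]
def pvMk (n m : Nat) (F : Nat → Nat → Int) : List (List Int) :=
  (List.range n).map (fun i => (List.range m).map (fun j => F i j))
def pvAv (a : List (List Int)) (i y : Nat) : Int := (a.getD y []).getD (i - y) 0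
def pvDsum (a : List (List Int)) (i l r : Nat) : Int :=
  ((List.range' l (r - l)).map (fun y => pvAv a i y)).sum
theorem pvMk_congr (n m : Nat) (F G : Nat → Nat → Int)
    (h : ∀ i < n, ∀ j < m, F i j = G i j) : pvMk n m F = pvMk n m G := by
  unfold pvMk
  apply List.map_congr_left
  intro i hi
  apply List.map_congr_left
  intro j hj
  exact h i (List.mem_range.mp hi) j (List.mem_range.mp hj)
theorem pvMk_getD (n m : Nat) (F : Nat → Nat → Int) (i : Nat) (hi : i < n) :
    (pvMk n m F).getD i [] = (List.range m).map (fun j => F i j) := by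
  simp [pvMk, List.getD_eq_getElem?_getD, hi]
theorem pvMk_getD_getD (n m : Nat) (F : Nat → Nat → Int) (i j : Nat)
    (hi : i < n) (hj : j < m) : ((pvMk n m F).getD i []).getD j 0 = F i j := by
  rw [pvMk_getD n m F i hi]
  simp [List.getD_eq_getElem?_getD, hj]
theorem pvMk_set (n m : Nat) (F : Nat → Nat → Int) (i0 j0 : Nat) (v : Int)
    (hi : i0 < n) :
    (pvMk n m F).set i0 (((pvMk n m F).getD i0 []).set j0 v)
      = pvMk n m (fun i j => if i = i0 ∧ j = j0 then v else F i j) := by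
  rw [pvMk_getD n m F i0 hi]
  unfold pvMk
  rw [pvSet_map_range, pvSet_map_range]
  apply List.map_congr_left
  intro i hmem
  by_cases hii : i = i0
  · subst hii
    simp only [if_pos]
    apply List.map_congr_left
    intro j _
    by_cases hjj : j = j0 <;> simp [hjj]
  · simp only [if_neg hii]
    apply List.map_congr_left
    intro j _
    simp [hii]

theorem pvInnerA (a : List (List Int)) (Y X : Nat) (F : Nat → Nat → Int) (y t : Nat)
    (hy : y < Y) (ht : t ≤ X) :
    (List.range t).foldl (fun ps x =>
        ps.set (y + x) ((ps.getD (y + x) []).set (y + 1)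
          ((ps.getD (y + x) []).getD y 0 + (a.getD y []).getD x 0)))
      (pvMk (Y + X - 1) (Y + 1) F)
      = pvMk (Y + X - 1) (Y + 1)
          (fun i j => if y ≤ i ∧ i < y + t ∧ j = y + 1 then F i y + pvAv a i y else F i j) := by
  induction t with
  | zero =>
      simp only [List.range_zero, List.foldl_nil]
      apply pvMk_congr
      intro i _ j _
      have : ¬ (y ≤ i ∧ i < y + 0 ∧ j = y + 1) := by omega
      rw [if_neg this]
  | succ t ih =>
      rw [List.range_succ, List.foldl_append, ih (Nat.le_of_succ_le ht)]
      simp only [List.foldl_cons, List.foldl_nil]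
      have hin : y + t < Y + X - 1 := by omega
      rw [pvMk_getD_getD _ _ _ (y + t) y hin (by omega)]
      rw [if_neg (by omega : ¬ (y ≤ y + t ∧ y + t < y + t ∧ y = y + 1))]
      rw [pvMk_set _ _ _ _ _ _ hin]
      apply pvMk_congr
      intro i hi j hj
      by_cases h1 : i = y + t ∧ j = y + 1
      · obtain ⟨h1a, h1b⟩ := h1
        subst h1a; subst h1b
        rw [if_pos ⟨rfl, rfl⟩, if_pos (by omega)]
        simp [pvAv, show y + t - y = t by omega]
      · rw [if_neg h1]
        by_cases h2 : y ≤ i ∧ i < y + t ∧ j = y + 1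
        · rw [if_pos h2, if_pos (by omega)]
        · rw [if_neg h2, if_neg (by omega)]

theorem pvDsum_self (a : List (List Int)) (i l : Nat) : pvDsum a i l l = 0 := by
  simp [pvDsum]

theorem pvDsum_succ (a : List (List Int)) (i l k : Nat) (h : l ≤ k) :
    pvDsum a i l (k + 1) = pvDsum a i l k + pvAv a i k := by
  unfold pvDsum
  rw [show k + 1 - l = (k - l) + 1 by omega]
  rw [show List.range' l (k - l + 1) = List.range' l (k - l) ++ [l + (k - l)] by
    simpa using List.range'_concat (s := l) (n := k - l) (step := 1)]
  simp [show l + (k - l) = k by omega]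

theorem pvOuterA (a : List (List Int)) (Y X k : Nat) (hk : k ≤ Y) :
    (List.range k).foldl (fun ps y =>
        (List.range X).foldl (fun ps x =>
          ps.set (y + x) ((ps.getD (y + x) []).set (y + 1)
            ((ps.getD (y + x) []).getD y 0 + (a.getD y []).getD x 0))) ps)
      (pvMk (Y + X - 1) (Y + 1) (fun _ _ => 0))
      = pvMk (Y + X - 1) (Y + 1)
          (fun i j => if i + 1 - X < j ∧ j ≤ i + 1 ∧ j ≤ k then pvDsum a i (i + 1 - X) j else 0) := by
  induction k with
  | zero =>
      simp only [List.range_zero, List.foldl_nil]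
      apply pvMk_congr
      intro i _ j _
      rw [if_neg (by omega)]
  | succ k ih =>
      rw [List.range_succ, List.foldl_append, ih (by omega)]
      simp only [List.foldl_cons, List.foldl_nil]
      rw [pvInnerA a Y X _ k X (by omega) le_rfl]
      apply pvMk_congr
      intro i hi j hj
      by_cases h1 : k ≤ i ∧ i < k + X ∧ j = k + 1
      · obtain ⟨h1a, h1b, h1c⟩ := h1
        subst h1c
        rw [if_pos ⟨h1a, h1b, rfl⟩]
        by_cases h2 : i + 1 - X < k ∧ k ≤ i + 1 ∧ k ≤ k
        · rw [if_pos h2, if_pos (by omega), pvDsum_succ a i _ k (by omega)]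
        · rw [if_neg h2, if_pos (by omega)]
          have hlk : i + 1 - X = k := by omega
          rw [hlk, pvDsum_succ a i k k le_rfl, pvDsum_self]
      · rw [if_neg h1]
        by_cases h2 : i + 1 - X < j ∧ j ≤ i + 1 ∧ j ≤ k
        · rw [if_pos h2, if_pos (by omega)]
        · rw [if_neg h2, if_neg (by omega)]

theorem pvInnerB (a : List (List Int)) (Y X : Nat) (F : Nat → Nat → Int) (i c : Nat)
    (hi : i < Y + X - 1) :
    (List.range' (i + 1 - X) c).foldl
      (fun (st : List (List Int) × Int) y =>
        ((st.1).set i (((st.1).getD i []).set (y + 1) (st.2 + (a.getD y []).getD (i - y) 0)),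
         st.2 + (a.getD y []).getD (i - y) 0))
      (pvMk (Y + X - 1) (Y + 1) F, 0)
      = (pvMk (Y + X - 1) (Y + 1)
          (fun i' j => if i' = i ∧ i + 1 - X < j ∧ j ≤ i + 1 - X + c
                       then pvDsum a i (i + 1 - X) j else F i' j),
         pvDsum a i (i + 1 - X) (i + 1 - X + c)) := by
  induction c with
  | zero =>
      simp only [List.range'_zero, List.foldl_nil]
      refine Prod.ext ?_ ?_
      · apply pvMk_congr
        intro i' _ j _
        rw [if_neg (by omega)]
      · simp [pvDsum_self]
  | succ c ih =>
      rw [show List.range' (i + 1 - X) (c + 1) = List.range' (i + 1 - X) c ++ [(i + 1 - X) + c] by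
            simpa using List.range'_concat (s := i + 1 - X) (n := c) (step := 1),
          List.foldl_append, ih]
      simp only [List.foldl_cons, List.foldl_nil]
      have hset := pvMk_set (Y + X - 1) (Y + 1)
        (fun i' j => if i' = i ∧ i + 1 - X < j ∧ j ≤ i + 1 - X + c
                     then pvDsum a i (i + 1 - X) j else F i' j)
        i ((i + 1 - X) + c + 1)
        (pvDsum a i (i + 1 - X) (i + 1 - X + c) + (a.getD ((i + 1 - X) + c) []).getD (i - ((i + 1 - X) + c)) 0)
        hi
      refine Prod.ext ?_ ?_
      · simp only []
        rw [hset]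
        apply pvMk_congr
        intro i' hi' j hj
        beta_reduce
        have hav : (a.getD ((i + 1 - X) + c) []).getD (i - ((i + 1 - X) + c)) 0
            = pvAv a i ((i + 1 - X) + c) := rfl
        by_cases h1 : i' = i ∧ j = (i + 1 - X) + c + 1
        · obtain ⟨h1a, h1b⟩ := h1
          subst h1a; subst h1b
          rw [if_pos ⟨rfl, rfl⟩, if_pos (by omega)]
          rw [hav, ← pvDsum_succ a i' _ _ (by omega)]
        · rw [if_neg h1]
          by_cases h2 : i' = i ∧ i + 1 - X < j ∧ j ≤ i + 1 - X + c
          · rw [if_pos h2, if_pos (by omega)]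
          · rw [if_neg h2, if_neg (by omega)]
      · simp only []
        rw [show i + 1 - X + (c + 1) = (i + 1 - X + c) + 1 by omega,
            pvDsum_succ a i _ _ (by omega)]
        rfl

def pvCell (a : List (List Int)) (Y X i j : Nat) : Int :=
  if i + 1 - X < j ∧ j ≤ i + 1 ∧ j ≤ Y then pvDsum a i (i + 1 - X) j else 0

theorem pvOuterB (a : List (List Int)) (Y X t : Nat) (hY : 1 ≤ Y) (ht : t ≤ Y + X - 1) :
    (List.range t).foldl (fun ps i =>
        ((List.range' (i + 1 - X) (min (Y - 1) i + 1 - (i + 1 - X))).foldl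
          (fun (st : List (List Int) × Int) y =>
            ((st.1).set i (((st.1).getD i []).set (y + 1) (st.2 + (a.getD y []).getD (i - y) 0)),
             st.2 + (a.getD y []).getD (i - y) 0))
          (ps, 0)).1)
      (pvMk (Y + X - 1) (Y + 1) (fun _ _ => 0))
      = pvMk (Y + X - 1) (Y + 1) (fun i j => if i < t then pvCell a Y X i j else 0) := by
  induction t with
  | zero =>
      simp only [List.range_zero, List.foldl_nil]
      apply pvMk_congr
      intro i _ j _
      rw [if_neg (by omega)]
  | succ t ih =>
      rw [List.range_succ, List.foldl_append, ih (by omega)]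
      simp only [List.foldl_cons, List.foldl_nil]
      rw [pvInnerB a Y X _ t (min (Y - 1) t + 1 - (t + 1 - X)) (by omega)]
      simp only []
      have hlo : t + 1 - X + (min (Y - 1) t + 1 - (t + 1 - X)) = min (Y - 1) t + 1 := by omega
      apply pvMk_congr
      intro i hi j hj
      beta_reduce
      rw [hlo]
      unfold pvCell
      by_cases h1 : i = t
      · subst h1
        split_ifs <;> first | rfl | omega
      · split_ifs <;> first | rfl | omega

theorem pvMk_zero (n m : Nat) :
    (List.range n).map (fun _ => List.replicate m (0 : Int)) = pvMk n m (fun _ _ => 0) := by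
  simp [pvMk, List.map_const']

-- ===== VERDICT (by name: the statement is the Claim_ definition above) =====
theorem prefix_sum_2d_diag_up_1_spec : Claim_equal_prefix_sum_2d_diag_up_1 := by
  intro a _ hPre
  unfold Spec_prefix_sum_2d_diag_up_1
  obtain ⟨hne, -⟩ := hPre
  have hY : 1 ≤ a.length := List.length_pos_iff.mpr hne
  show prefix_sum_2d_diag_up_1 a = prefix_sum_2d_diag_up_1_alt a
  simp only [prefix_sum_2d_diag_up_1, prefix_sum_2d_diag_up_1_alt]
  rw [pvMk_zero, pvOuterA a a.length (a.headD []).length a.length le_rfl,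
      pvOuterB a a.length (a.headD []).length (a.length + (a.headD []).length - 1) hY le_rfl]
  apply pvMk_congr
  intro i hi j hj
  rw [if_pos hi]
  unfold pvCell
  rfl
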